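-- pv_equiv track=rewrite | github.com/mtfuka/competitive-programming | AtCoder/競プロ典型 90 問/067.py | f
-- ===== SOURCE A (Python) =====
-- def f(x):
--     x1 = 0
--     n1 = 0
--     while x>0:
--         x1 += x % 10 * (8**n1)
--         x //= 10
--         n1 += 1
--     x2 = 0
--     n2 = 0
--     while x1>0:
--         if (x1 % 9) ==8:
--             x2 += 5 * (10**n2)
--         else:
--             x2 += x1 % 9 * (10**n2)
--         x1 //= 9
--         n2 += 1
--     return x2
-- ===== SOURCE B (Python) =====
-- def rebase8(v):
--     # Horner: read the decimal digits of v as a base-8 number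
--     if v <= 0:
--         return 0
--     return rebase8(v // 10) * 8 + v % 10
--
--
-- def sub9(v):
--     # Horner: base-9 digits of v read as decimal, with digit 8 replaced by 5
--     if v <= 0:
--         return 0
--     r = v % 9
--     return sub9(v // 9) * 10 + (5 if r == 8 else r)
--
--
-- def f(x):
--     return sub9(rebase8(x))
-- ===== Notes on version B (the rewrite author's own statement) =====
-- stated objective: simpler
-- what changed: Replaced A's two while-loops that accumulate explicit 8**n / 10**n power terms with two tiny top-down Horner recursions (no position counters or power computations).
import Mathlib
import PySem

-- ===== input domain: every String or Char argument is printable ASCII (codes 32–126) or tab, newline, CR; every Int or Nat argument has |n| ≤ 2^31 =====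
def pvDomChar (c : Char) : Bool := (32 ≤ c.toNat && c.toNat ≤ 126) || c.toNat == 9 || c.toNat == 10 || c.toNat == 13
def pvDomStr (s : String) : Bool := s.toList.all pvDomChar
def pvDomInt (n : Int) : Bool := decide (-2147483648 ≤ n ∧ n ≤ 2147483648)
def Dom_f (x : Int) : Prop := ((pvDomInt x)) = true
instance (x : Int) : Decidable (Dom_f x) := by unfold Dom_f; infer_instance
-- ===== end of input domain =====

-- B replaces A's two power-accumulating while-loops by two top-down Horner recursions (simpler; same values).

-- ===== PORT A =====
-- first while-loop of A: x1 += x % 10 * 8**n1; x //= 10; n1 += 1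
def fL1 (x x1 : Int) (n1 : Nat) : Int :=
  if _h : x > 0 then
    fL1 (PySem.Int.floordiv x 10) (x1 + PySem.Int.mod x 10 * 8 ^ n1) (n1 + 1)
  else x1
termination_by x.toNat
decreasing_by
  rw [PySem.Int.floordiv_eq_ediv_of_pos (by omega : (0:Int) < 10)]
  omega

-- second while-loop of A: digit substitution into x2 with 10**n2 weights
def fL2 (x1 x2 : Int) (n2 : Nat) : Int :=
  if _h : x1 > 0 then
    fL2 (PySem.Int.floordiv x1 9)
        (x2 + (if PySem.Int.mod x1 9 = 8 then 5 * 10 ^ n2 else PySem.Int.mod x1 9 * 10 ^ n2))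
        (n2 + 1)
  else x2
termination_by x1.toNat
decreasing_by
  rw [PySem.Int.floordiv_eq_ediv_of_pos (by omega : (0:Int) < 9)]
  omega

def f (x : Int) : Int := fL2 (fL1 x 0 0) 0 0

-- ===== PORT B =====
def rebase8 (v : Int) : Int :=
  if v ≤ 0 then 0
  else rebase8 (PySem.Int.floordiv v 10) * 8 + PySem.Int.mod v 10
termination_by v.toNat
decreasing_by
  rw [PySem.Int.floordiv_eq_ediv_of_pos (by omega : (0:Int) < 10)]
  omega

def sub9 (v : Int) : Int :=
  if v ≤ 0 then 0
  else sub9 (PySem.Int.floordiv v 9) * 10 +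
       (if PySem.Int.mod v 9 = 8 then 5 else PySem.Int.mod v 9)
termination_by v.toNat
decreasing_by
  rw [PySem.Int.floordiv_eq_ediv_of_pos (by omega : (0:Int) < 9)]
  omega

def f_alt (x : Int) : Int := sub9 (rebase8 x)

-- ===== PRECONDITION & SPEC =====
def Spec_f (x : Int) (out : Int) : Prop := out = f_alt x
instance (x : Int) (out : Int) : Decidable (Spec_f x out) := by unfold Spec_f; infer_instance

-- ===== CLAIM (what is proved, stated in full; the proofs are below) =====
def Claim_equal_f : Prop := ∀ (x : Int), Dom_f x → Spec_f x (f x)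

-- ===== LEMMAS AND PROOFS =====
lemma fL1_eq (n : Nat) : ∀ (x x1 : Int) (nn : Nat), x.toNat ≤ n →
    fL1 x x1 nn = x1 + 8 ^ nn * rebase8 x := by
  induction n with
  | zero =>
    intro x x1 nn hx
    rw [fL1, rebase8]
    rw [dif_neg (by omega), if_pos (by omega)]
    ring
  | succ n ih =>
    intro x x1 nn hx
    by_cases hx0 : x > 0
    · have hlt : (PySem.Int.floordiv x 10).toNat ≤ n := by
        rw [PySem.Int.floordiv_eq_ediv_of_pos (by omega : (0:Int) < 10)]
        omega
      rw [fL1, dif_pos hx0, ih _ _ _ hlt]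
      conv_rhs => rw [rebase8]
      rw [if_neg (show ¬ x ≤ 0 by omega)]
      ring
    · rw [fL1, rebase8, dif_neg hx0, if_pos (by omega)]
      ring

lemma fL2_eq (n : Nat) : ∀ (v x2 : Int) (nn : Nat), v.toNat ≤ n →
    fL2 v x2 nn = x2 + 10 ^ nn * sub9 v := by
  induction n with
  | zero =>
    intro v x2 nn hv
    rw [fL2, sub9]
    rw [dif_neg (by omega), if_pos (by omega)]
    ring
  | succ n ih =>
    intro v x2 nn hv
    by_cases hv0 : v > 0
    · have hlt : (PySem.Int.floordiv v 9).toNat ≤ n := by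
        rw [PySem.Int.floordiv_eq_ediv_of_pos (by omega : (0:Int) < 9)]
        omega
      rw [fL2, dif_pos hv0, ih _ _ _ hlt]
      conv_rhs => rw [sub9]
      rw [if_neg (show ¬ v ≤ 0 by omega)]
      by_cases hm : PySem.Int.mod v 9 = 8
      · rw [if_pos hm, if_pos hm]; ring
      · rw [if_neg hm, if_neg hm]; ring
    · rw [fL2, sub9, dif_neg hv0, if_pos (by omega)]
      ring

-- ===== VERDICT (by name: the statement is the Claim_ definition above) =====
theorem f_spec : Claim_equal_f := by
  intro x _
  unfold Spec_f f f_alt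
  rw [fL1_eq x.toNat x 0 0 le_rfl, fL2_eq (0 + 8 ^ 0 * rebase8 x).toNat _ 0 0 le_rfl]
  ring_nf
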